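-- pv_equiv track=rewrite | github.com/opnureyes2-del/Cirkelline-Kv1ntos | cirkelline/endpoints/graduation.py | _assign_team
-- ===== SOURCE A (Python) =====
-- from typing import List, Optional
--
-- def _assign_team(specialty: str, skills: List[str]) -> str:
--     """Assign graduated agent to a Cirkelline team based on specialty"""
--     specialty_lower = specialty.lower()
--     skills_str = " ".join(s.lower() for s in skills)
--
--     if any(k in specialty_lower for k in ["law", "legal", "contract", "compliance"]):
--         return "law_team"
--     elif any(k in specialty_lower for k in ["research", "analysis", "data"]):
--         return "research_team"
--     elif any(k in specialty_lower for k in ["code", "program", "develop", "software"]):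
--         return "development_team"
--     elif any(k in skills_str for k in ["creative", "writing", "content"]):
--         return "creative_team"
--     else:
--         return "general_team"
-- ===== SOURCE B (Python) =====
-- from typing import List
--
-- # (keyword, team) pairs matched against the lowered specialty
-- _SPECIALTY_KEYWORD_TEAMS = [
--     ("law", "law_team"), ("legal", "law_team"),
--     ("contract", "law_team"), ("compliance", "law_team"),
--     ("research", "research_team"), ("analysis", "research_team"),
--     ("data", "research_team"),
--     ("code", "development_team"), ("program", "development_team"),
--     ("develop", "development_team"), ("software", "development_team"),
-- ]
-- # (keyword, team) pairs matched against the joined lowered skills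
-- _SKILL_KEYWORD_TEAMS = [
--     ("creative", "creative_team"), ("writing", "creative_team"),
--     ("content", "creative_team"),
-- ]
-- _PRIORITY = ["law_team", "research_team", "development_team", "creative_team"]
--
-- def _assign_team(specialty: str, skills: List[str]) -> str:
--     """Assign graduated agent to a Cirkelline team based on specialty"""
--     specialty_lower = specialty.lower()
--     skills_str = " ".join(s.lower() for s in skills)
--     # stage 1: collect the set of ALL teams whose keywords occur
--     matched = {team for kw, team in _SPECIALTY_KEYWORD_TEAMS if kw in specialty_lower}
--     matched |= {team for kw, team in _SKILL_KEYWORD_TEAMS if kw in skills_str}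
--     # stage 2: pick the highest-priority matched team
--     return next((t for t in _PRIORITY if t in matched), "general_team")
-- ===== Notes on version B (the rewrite author's own statement) =====
-- stated objective: alternative
-- what changed: Instead of a short-circuiting if/elif chain of grouped any() checks, B first collects the full set of matched teams from flat (keyword, team) pair lists in one stage, then selects the highest-priority matched team from a priority list in a second stage.
import Mathlib
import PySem

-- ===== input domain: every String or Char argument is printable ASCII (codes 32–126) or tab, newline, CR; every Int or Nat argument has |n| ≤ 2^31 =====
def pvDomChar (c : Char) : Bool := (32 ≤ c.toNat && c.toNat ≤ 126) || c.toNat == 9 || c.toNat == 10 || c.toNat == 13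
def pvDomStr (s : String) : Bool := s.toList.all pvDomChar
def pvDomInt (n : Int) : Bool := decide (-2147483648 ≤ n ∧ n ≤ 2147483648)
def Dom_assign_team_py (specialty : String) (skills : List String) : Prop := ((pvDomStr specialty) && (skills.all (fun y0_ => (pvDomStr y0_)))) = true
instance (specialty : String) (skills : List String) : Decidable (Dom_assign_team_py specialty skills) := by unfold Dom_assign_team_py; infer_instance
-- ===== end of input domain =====

-- B replaces A's short-circuiting if/elif chain by two stages: collect the set of all matched teams from flat (keyword, team) pair lists, then pick the first matched team from a priority list (objective: alternative, same cost).

-- ===== PORT A =====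
def assign_team_py (specialty : String) (skills : List String) : String :=
  let specialty_lower := PySem.Str.lower specialty
  let skills_str := PySem.Str.join " " (skills.map PySem.Str.lower)
  if ["law", "legal", "contract", "compliance"].any (fun k => PySem.Str.isIn k specialty_lower) then
    "law_team"
  else if ["research", "analysis", "data"].any (fun k => PySem.Str.isIn k specialty_lower) then
    "research_team"
  else if ["code", "program", "develop", "software"].any (fun k => PySem.Str.isIn k specialty_lower) then
    "development_team"
  else if ["creative", "writing", "content"].any (fun k => PySem.Str.isIn k skills_str) then
    "creative_team"
  else
    "general_team"

-- ===== PORT B =====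
-- Source B's module-level tables
def pvSpecialtyKwTeams : List (String × String) :=
  [("law", "law_team"), ("legal", "law_team"),
   ("contract", "law_team"), ("compliance", "law_team"),
   ("research", "research_team"), ("analysis", "research_team"),
   ("data", "research_team"),
   ("code", "development_team"), ("program", "development_team"),
   ("develop", "development_team"), ("software", "development_team")]
def pvSkillKwTeams : List (String × String) :=
  [("creative", "creative_team"), ("writing", "creative_team"),
   ("content", "creative_team")]
def pvPriority : List String :=
  ["law_team", "research_team", "development_team", "creative_team"]

def assign_team_py_alt (specialty : String) (skills : List String) : String :=
  let specialty_lower := PySem.Str.lower specialty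
  let skills_str := PySem.Str.join " " (skills.map PySem.Str.lower)
  -- stage 1: the set comprehension and the |= (set union)
  let matched : PySem.Set String :=
    PySem.Set.ofList ((pvSpecialtyKwTeams.filter (fun p => PySem.Str.isIn p.1 specialty_lower)).map Prod.snd)
  let matched :=
    PySem.Set.union matched ((pvSkillKwTeams.filter (fun p => PySem.Str.isIn p.1 skills_str)).map Prod.snd)
  -- stage 2: next((t for t in _PRIORITY if t in matched), "general_team")
  (pvPriority.find? (fun t => PySem.Set.contains matched t)).getD "general_team"

-- ===== PRECONDITION & SPEC =====
def Spec_assign_team_py (specialty : String) (skills : List String) (out : String) : Prop := out = assign_team_py_alt specialty skills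
instance (specialty : String) (skills : List String) (out : String) : Decidable (Spec_assign_team_py specialty skills out) := by unfold Spec_assign_team_py; infer_instance

-- ===== CLAIM (what is proved, stated in full; the proofs are below) =====
def Claim_equal_assign_team_py : Prop := ∀ (specialty : String) (skills : List String), Dom_assign_team_py specialty skills → Spec_assign_team_py specialty skills (assign_team_py specialty skills)


-- ===== LEMMAS AND PROOFS =====
-- contains of the matched set, characterised per team as the corresponding keyword disjunction
theorem pvContains_law (s t : String) :
    PySem.Set.contains
      (PySem.Set.union
        (PySem.Set.ofList ((pvSpecialtyKwTeams.filter (fun p => PySem.Str.isIn p.1 s)).map Prod.snd))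
        ((pvSkillKwTeams.filter (fun p => PySem.Str.isIn p.1 t)).map Prod.snd)) "law_team"
    = ["law", "legal", "contract", "compliance"].any (fun k => PySem.Str.isIn k s) := by
  rw [Bool.eq_iff_iff]
  simp [pvSpecialtyKwTeams, pvSkillKwTeams, PySem.Set.mem_union, PySem.Set.mem_ofList, List.mem_filter]

theorem pvContains_research (s t : String) :
    PySem.Set.contains
      (PySem.Set.union
        (PySem.Set.ofList ((pvSpecialtyKwTeams.filter (fun p => PySem.Str.isIn p.1 s)).map Prod.snd))
        ((pvSkillKwTeams.filter (fun p => PySem.Str.isIn p.1 t)).map Prod.snd)) "research_team"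
    = ["research", "analysis", "data"].any (fun k => PySem.Str.isIn k s) := by
  rw [Bool.eq_iff_iff]
  simp [pvSpecialtyKwTeams, pvSkillKwTeams, PySem.Set.mem_union, PySem.Set.mem_ofList, List.mem_filter]

theorem pvContains_dev (s t : String) :
    PySem.Set.contains
      (PySem.Set.union
        (PySem.Set.ofList ((pvSpecialtyKwTeams.filter (fun p => PySem.Str.isIn p.1 s)).map Prod.snd))
        ((pvSkillKwTeams.filter (fun p => PySem.Str.isIn p.1 t)).map Prod.snd)) "development_team"
    = ["code", "program", "develop", "software"].any (fun k => PySem.Str.isIn k s) := by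
  rw [Bool.eq_iff_iff]
  simp [pvSpecialtyKwTeams, pvSkillKwTeams, PySem.Set.mem_union, PySem.Set.mem_ofList, List.mem_filter]

theorem pvContains_creative (s t : String) :
    PySem.Set.contains
      (PySem.Set.union
        (PySem.Set.ofList ((pvSpecialtyKwTeams.filter (fun p => PySem.Str.isIn p.1 s)).map Prod.snd))
        ((pvSkillKwTeams.filter (fun p => PySem.Str.isIn p.1 t)).map Prod.snd)) "creative_team"
    = ["creative", "writing", "content"].any (fun k => PySem.Str.isIn k t) := by
  rw [Bool.eq_iff_iff]
  simp [pvSpecialtyKwTeams, pvSkillKwTeams, PySem.Set.mem_union, PySem.Set.mem_ofList, List.mem_filter]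

-- the two bodies agree for any lowered specialty s and joined skills string t
theorem pvMain (s t : String) :
    (if ["law", "legal", "contract", "compliance"].any (fun k => PySem.Str.isIn k s) then
      "law_team"
    else if ["research", "analysis", "data"].any (fun k => PySem.Str.isIn k s) then
      "research_team"
    else if ["code", "program", "develop", "software"].any (fun k => PySem.Str.isIn k s) then
      "development_team"
    else if ["creative", "writing", "content"].any (fun k => PySem.Str.isIn k t) then
      "creative_team"
    else
      "general_team")
    = ((pvPriority.find? (fun team => PySem.Set.contains
        (PySem.Set.union
          (PySem.Set.ofList ((pvSpecialtyKwTeams.filter (fun p => PySem.Str.isIn p.1 s)).map Prod.snd))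
          ((pvSkillKwTeams.filter (fun p => PySem.Str.isIn p.1 t)).map Prod.snd)) team)).getD "general_team") := by
  cases e1 : ["law", "legal", "contract", "compliance"].any (fun k => PySem.Str.isIn k s) <;>
  cases e2 : ["research", "analysis", "data"].any (fun k => PySem.Str.isIn k s) <;>
  cases e3 : ["code", "program", "develop", "software"].any (fun k => PySem.Str.isIn k s) <;>
  cases e4 : ["creative", "writing", "content"].any (fun k => PySem.Str.isIn k t) <;>
    simp only [pvPriority, List.find?, pvContains_law, pvContains_research, pvContains_dev,
               pvContains_creative, e1, e2, e3, e4, Option.getD_some] <;> rfl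

-- ===== VERDICT (by name: the statement is the Claim_ definition above) =====
theorem assign_team_py_spec : Claim_equal_assign_team_py := by
  intro specialty skills _
  unfold Spec_assign_team_py assign_team_py assign_team_py_alt
  exact pvMain (PySem.Str.lower specialty) (PySem.Str.join " " (skills.map PySem.Str.lower))
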